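-- pv_equiv track=rewrite | github.com/EkaterinaTarakanova/studying | buns/mod2/task10.py | new_word
-- ===== SOURCE A (Python) =====
-- def new_word(words):
--     new_word = ""
--     word = ""
--     for letter in words:
--         if letter != " ":
--             word += letter
--         else:
--             if len(word) > 0:
--                 last_letter = word[-1]
--                 new_word += last_letter
--             word = ""
--     if len(word) > 0:
--         last_letter = word[-1]
--         new_word += last_letter
--     return new_word
-- ===== SOURCE B (Python) =====
-- def new_word(words):
--     return "".join(w[-1] for w in words.split(" ") if w)
-- ===== Notes on version B (the rewrite author's own statement) =====
-- stated objective: idiomatic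
-- what changed: Replaces the character-by-character state machine (current-word buffer flushed at each space, built by repeated string concatenation) by tokenizing with a single-space split and joining the last character of each non-empty token.
import Mathlib
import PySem

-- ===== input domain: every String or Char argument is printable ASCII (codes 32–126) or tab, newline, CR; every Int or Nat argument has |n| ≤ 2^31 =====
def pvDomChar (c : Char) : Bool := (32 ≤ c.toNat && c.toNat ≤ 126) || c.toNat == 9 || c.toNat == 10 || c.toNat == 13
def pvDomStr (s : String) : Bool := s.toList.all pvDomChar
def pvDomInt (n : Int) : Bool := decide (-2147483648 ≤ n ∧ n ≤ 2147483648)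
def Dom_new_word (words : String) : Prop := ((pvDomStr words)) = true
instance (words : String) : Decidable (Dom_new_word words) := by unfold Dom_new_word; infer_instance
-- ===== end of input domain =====

-- B tokenizes with split(" ") and joins the last character of each non-empty token,
-- instead of A's one-character-at-a-time buffer state machine (objective: idiomatic).

-- ===== PORT A =====
-- the loop body: state = (new_word, word), both as lists of characters
def nwStep (st : List Char × List Char) (letter : Char) : List Char × List Char :=
  if letter ≠ ' ' then (st.1, st.2 ++ [letter])
  else if st.2.length > 0 then (st.1 ++ [PySem.List.pyGetD st.2 (-1) ' '], ([] : List Char))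
  else (st.1, ([] : List Char))

-- the final flush after the loop
def nwFin (st : List Char × List Char) : List Char :=
  if st.2.length > 0 then st.1 ++ [PySem.List.pyGetD st.2 (-1) ' '] else st.1

def new_word (words : String) : String :=
  String.mk (nwFin (words.toList.foldl nwStep ([], [])))

-- ===== PORT B =====
def new_word_alt (words : String) : String :=
  String.mk (((PySem.Chars.splitOn words.toList [' ']).filter (fun w => !w.isEmpty)).map
    (fun w => PySem.List.pyGetD w (-1) ' '))

-- ===== PRECONDITION & SPEC =====
def Spec_new_word (words : String) (out : String) : Prop := out = new_word_alt words
instance (words : String) (out : String) : Decidable (Spec_new_word words out) := by unfold Spec_new_word; infer_instance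

-- ===== CLAIM (what is proved, stated in full; the proofs are below) =====
def Claim_equal_new_word : Prop := ∀ (words : String), Dom_new_word words → Spec_new_word words (new_word words)

-- ===== LEMMAS AND PROOFS =====

-- fuel-free reformulation of splitOn.go for the single-character separator ' '
def go2 (l : List Char) (cur : List Char) : List (List Char) :=
  match l with
  | [] => [cur.reverse]
  | c :: rest => if c = ' ' then cur.reverse :: go2 rest [] else go2 rest (c :: cur)

-- B's filter+map, as one function
def bcore (xs : List (List Char)) : List Char :=
  (xs.filter (fun w => !w.isEmpty)).map (fun w => PySem.List.pyGetD w (-1) ' ')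

-- the three shapes of A's loop body
theorem nwStep_char (nw w : List Char) (c : Char) (hc : c ≠ ' ') :
    nwStep (nw, w) c = (nw, w ++ [c]) := by
  simp [nwStep, hc]

theorem nwStep_space_pos (nw w : List Char) (h : w.length > 0) :
    nwStep (nw, w) ' ' = (nw ++ [PySem.List.pyGetD w (-1) ' '], ([] : List Char)) := by
  simp [nwStep, h]

theorem nwStep_space_nil (nw : List Char) :
    nwStep (nw, ([] : List Char)) ' ' = (nw, ([] : List Char)) := by
  simp [nwStep]

theorem go_eq_go2 (l : List Char) :
    ∀ (fuel : Nat) (cur : List Char) (acc : List (List Char)), l.length < fuel →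
      PySem.Chars.splitOn.go [' '] fuel l cur acc = acc.reverse ++ go2 l cur := by
  induction l with
  | nil =>
      intro fuel cur acc h
      obtain ⟨f, rfl⟩ : ∃ f, fuel = f + 1 := ⟨fuel - 1, by omega⟩
      simp [PySem.Chars.splitOn.go, go2]
  | cons c rest ih =>
      intro fuel cur acc h
      obtain ⟨f, rfl⟩ : ∃ f, fuel = f + 1 := ⟨fuel - 1, by omega⟩
      by_cases hc : c = ' '
      · subst hc
        rw [show PySem.Chars.splitOn.go [' '] (f+1) (' '::rest) cur acc
              = PySem.Chars.splitOn.go [' '] f rest [] (cur.reverse :: acc) from by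
            simp [PySem.Chars.splitOn.go, List.isPrefixOf]]
        rw [ih f [] (cur.reverse :: acc) (by simp at h; omega)]
        simp [go2]
      · rw [show PySem.Chars.splitOn.go [' '] (f+1) (c::rest) cur acc
              = PySem.Chars.splitOn.go [' '] f rest (c :: cur) acc from by
            simp [PySem.Chars.splitOn.go, List.isPrefixOf,
              show ¬ (' ' = c) from fun h' => hc h'.symm]]
        rw [ih f (c :: cur) acc (by simp at h; omega)]
        simp [go2, hc]

-- A's new_word accumulator only grows by appending: pull the prefix out of the fold
theorem foldA_prefix (l : List Char) :
    ∀ (nw w : List Char),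
      l.foldl nwStep (nw, w) =
        (nw ++ (l.foldl nwStep ([], w)).1, (l.foldl nwStep ([], w)).2) := by
  induction l with
  | nil => intro nw w; simp
  | cons c rest ih =>
      intro nw w
      by_cases hc : c = ' '
      · subst hc
        rcases Nat.eq_zero_or_pos w.length with hw | hw
        · obtain rfl : w = [] := List.length_eq_zero_iff.mp hw
          simp only [List.foldl_cons, nwStep_space_nil]
          exact ih nw []
        · simp only [List.foldl_cons, nwStep_space_pos _ _ hw]
          rw [ih (nw ++ [PySem.List.pyGetD w (-1) ' ']) [],
              ih ([] ++ [PySem.List.pyGetD w (-1) ' ']) []]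
          simp
      · simp only [List.foldl_cons, nwStep_char _ _ _ hc]
        exact ih nw (w ++ [c])

theorem nwFin_prefix (nw : List Char) (p : List Char × List Char) :
    nwFin (nw ++ p.1, p.2) = nw ++ nwFin p := by
  by_cases h : p.2.length > 0 <;> simp [nwFin, h]

theorem bcore_cons_rev (cur : List Char) (xs : List (List Char)) :
    bcore (cur.reverse :: xs) =
      (if cur.length > 0 then [PySem.List.pyGetD cur.reverse (-1) ' '] else []) ++ bcore xs := by
  rcases Nat.eq_zero_or_pos cur.length with h | h
  · obtain rfl : cur = [] := List.length_eq_zero_iff.mp h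
    simp [bcore]
  · have h0 : cur ≠ [] := by
      intro h'; simp [h'] at h
    have hne : (!cur.reverse.isEmpty) = true := by
      simp [h0]
    simp [bcore, h, List.filter_cons, hne, h0]

-- the central correspondence: A's fold-and-flush equals B's filter-map over go2
theorem main_corr (l : List Char) :
    ∀ (cur : List Char),
      nwFin (l.foldl nwStep ([], cur.reverse)) = bcore (go2 l cur) := by
  induction l with
  | nil =>
      intro cur
      rw [show go2 [] cur = [cur.reverse] from rfl, bcore_cons_rev]
      rcases Nat.eq_zero_or_pos cur.length with h | h
      · obtain rfl : cur = [] := List.length_eq_zero_iff.mp h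
        simp [nwFin, bcore]
      · simp [nwFin, h, bcore]
  | cons c rest ih =>
      intro cur
      by_cases hc : c = ' '
      · subst hc
        rw [show go2 (' ' :: rest) cur = cur.reverse :: go2 rest [] from by simp [go2],
            bcore_cons_rev]
        rcases Nat.eq_zero_or_pos cur.length with hw | hw
        · obtain rfl : cur = [] := List.length_eq_zero_iff.mp hw
          simp only [List.reverse_nil, List.foldl_cons, nwStep_space_nil]
          have := ih []
          simp only [List.reverse_nil] at this
          simpa using this
        · have hlen : cur.reverse.length > 0 := by simpa using hw
          simp only [List.foldl_cons, nwStep_space_pos _ _ hlen]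
          rw [foldA_prefix, nwFin_prefix]
          have := ih []
          simp only [List.reverse_nil] at this
          rw [this]
          simp [hw]
      · rw [show go2 (c :: rest) cur = go2 rest (c :: cur) from by simp [go2, hc]]
        simp only [List.foldl_cons, nwStep_char _ _ _ hc]
        rw [show cur.reverse ++ [c] = (c :: cur).reverse from by simp]
        exact ih (c :: cur)

-- ===== VERDICT (by name: the statement is the Claim_ definition above) =====
theorem new_word_spec : Claim_equal_new_word := by
  intro words _
  show new_word words = new_word_alt words
  unfold new_word new_word_alt
  rw [show PySem.Chars.splitOn words.toList [' '] =
        PySem.Chars.splitOn.go [' '] (words.toList.length + 1) words.toList [] [] from rfl,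
      go_eq_go2 words.toList (words.toList.length + 1) [] [] (by omega)]
  have := main_corr words.toList []
  simp only [List.reverse_nil] at this
  rw [show ([] : List (List Char)).reverse ++ go2 words.toList [] = go2 words.toList [] from by simp]
  rw [this]
  rfl
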